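-- pv_equiv track=rewrite | github.com/Fz-TvT/blox_reproduction | placement/All_placement.py | _get_underutilized_servers
-- ===== SOURCE A (Python) =====
-- import heapq
--
-- def _get_underutilized_servers(
--      job_gpu_deficit: int, available_gpus: dict, consolidate: bool = False
-- ) -> dict:
--     """
--     Get servers with underutilized GPUs using priority queue.
--     Returns servers mapped to number of GPUs to allocate from each.
--     Args:
--         job_gpu_deficit: Number of GPUs needed (num_gpus)
--         available_gpus: Dictionary of available GPUs by node {node_id: [gpu_ids]}
--         consolidate: Whether to prefer consolidated placement
--     Returns:
--         Dictionary mapping node_id to number of GPUs to allocate from that server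
--     """
--     num_gpus = job_gpu_deficit
--
--     # If num_gpus > 1, try to find a single server with enough GPUs first
--     if num_gpus > 1:
--         # Try to find a server with enough GPUs for the entire job
--         for node_id, gpu_list in available_gpus.items():
--             if len(gpu_list) >= num_gpus:
--                 return {node_id: num_gpus}
--
--     # Use priority queue (heap) to allocate from servers with least free GPUs
--     # Create priority queue: (num_available_gpus, node_id)
--     # Min-heap: servers with least GPUs first
--     pq = [(len(gpu_list), node_id) for node_id, gpu_list in available_gpus.items()]
--     heapq.heapify(pq)
--
--     server_map = {}
--     remaining_gpus = num_gpus
--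
--     # Allocate GPUs from servers with least free GPUs first
--     while remaining_gpus > 0 and len(pq) > 0:
--         gpus_available, node_id = heapq.heappop(pq)
--
--         if gpus_available >= remaining_gpus:
--             # This server has enough GPUs for remaining demand
--             server_map[node_id] = remaining_gpus
--             return server_map
--         else:
--             # Take all available GPUs from this server
--             server_map[node_id] = gpus_available
--             remaining_gpus -= gpus_available
--
--     return server_map
-- ===== SOURCE B (Python) =====
-- def _get_underutilized_servers(
--      job_gpu_deficit: int, available_gpus: dict, consolidate: bool = False
-- ) -> dict:
--     """Same result as A: single sort of (free_gpu_count, node_id) pairs, then one scan."""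
--     num_gpus = job_gpu_deficit
--
--     # If num_gpus > 1, try to find a single server with enough GPUs first
--     if num_gpus > 1:
--         for node_id, gpu_list in available_gpus.items():
--             if len(gpu_list) >= num_gpus:
--                 return {node_id: num_gpus}
--
--     server_map = {}
--     remaining_gpus = num_gpus
--     # Scan servers in ascending (free_gpu_count, node_id) order.
--     for gpus_available, node_id in sorted((len(g), n) for n, g in available_gpus.items()):
--         if remaining_gpus <= 0:
--             break
--         if gpus_available >= remaining_gpus:
--             server_map[node_id] = remaining_gpus
--             break
--         server_map[node_id] = gpus_available
--         remaining_gpus -= gpus_available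
--     return server_map
-- ===== Notes on version B (the rewrite author's own statement) =====
-- stated objective: simpler
-- what changed: Replaces A's heapify + heappop priority-queue allocation loop with a single ascending sort of (free_gpu_count, node_id) pairs followed by one linear scan; Pre_ only excludes association lists with duplicate node-id keys, which do not represent a Python dict.
import Mathlib
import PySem

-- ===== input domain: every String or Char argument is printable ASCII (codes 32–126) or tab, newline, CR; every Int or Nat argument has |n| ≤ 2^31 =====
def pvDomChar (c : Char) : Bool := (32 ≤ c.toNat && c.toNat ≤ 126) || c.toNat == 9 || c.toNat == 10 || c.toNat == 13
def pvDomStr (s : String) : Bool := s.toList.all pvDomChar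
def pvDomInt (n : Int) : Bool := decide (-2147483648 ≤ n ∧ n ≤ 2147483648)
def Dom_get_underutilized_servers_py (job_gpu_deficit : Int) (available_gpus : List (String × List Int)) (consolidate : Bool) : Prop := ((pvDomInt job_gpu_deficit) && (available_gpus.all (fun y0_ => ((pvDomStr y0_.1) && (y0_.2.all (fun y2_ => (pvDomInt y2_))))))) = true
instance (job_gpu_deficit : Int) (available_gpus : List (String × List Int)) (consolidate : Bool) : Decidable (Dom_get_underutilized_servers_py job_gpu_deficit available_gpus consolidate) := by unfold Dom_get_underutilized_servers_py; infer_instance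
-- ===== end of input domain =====

-- B replaces A's heapify/heappop priority-queue allocation with one ascending sort of
-- (free_gpu_count, node_id) pairs followed by a single scan (objective: simpler, same cost).


-- Python's tuple comparison (count, node_id) = lexicographic on (Int, code-point string order);
-- Lean's '<' on s.toList is exactly Python's string order (PYSEM), so this key is exact here.
def pvKey (q : Int × String) : Lex (Int × List Char) := toLex (q.1, q.2.toList)

-- ===== PORT A =====
-- 'for node_id, gpu_list in available_gpus.items(): if len(gpu_list) >= num_gpus: return {node_id: num_gpus}'
def pvScanA (num : Int) : List (String × List Int) → Option (List (String × Int))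
  | [] => none
  | (node, g) :: t => if num ≤ (g.length : Int) then some [(node, num)] else pvScanA num t

-- heapq.heappop's popped element: the smallest (count, node_id) pair of pq (ties cannot
-- occur under Pre_, where all pairs are distinct); ported at heapq's documented contract.
def pvMinPair (m : Int × String) (l : List (Int × String)) : Int × String :=
  l.foldl (fun m y => if pvKey y < pvKey m then y else m) m

theorem pvMinPair_mem (x : Int × String) (xs : List (Int × String)) : pvMinPair x xs ∈ x :: xs := by
  induction xs generalizing x with
  | nil => simp [pvMinPair]
  | cons y ys ih =>
    have step : pvMinPair x (y :: ys) = pvMinPair (if pvKey y < pvKey x then y else x) ys := by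
      simp [pvMinPair]
    rw [step]
    have h := ih (if pvKey y < pvKey x then y else x)
    rw [List.mem_cons] at h
    rcases h with h | h
    · rw [h]; split_ifs <;> simp
    · simp [h]

-- 'while remaining_gpus > 0 and len(pq) > 0: heappop; allocate'
def pvHeapLoop (pq : List (Int × String)) (remaining : Int) (acc : List (String × Int)) : List (String × Int) :=
  if 0 < remaining then
    match pq with
    | [] => acc
    | x :: xs =>
      let m := pvMinPair x xs
      if remaining ≤ m.1 then acc ++ [(m.2, remaining)]
      else pvHeapLoop ((x :: xs).erase m) (remaining - m.1) (acc ++ [(m.2, m.1)])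
  else acc
termination_by pq.length
decreasing_by
  rw [List.length_erase_of_mem (pvMinPair_mem x xs)]
  simp

def get_underutilized_servers_py (job_gpu_deficit : Int) (available_gpus : List (String × List Int)) (consolidate : Bool) : List (String × Int) :=
  -- num_gpus = job_gpu_deficit
  match (if 1 < job_gpu_deficit then pvScanA job_gpu_deficit available_gpus else none) with
  | some r => r
  | none =>
    pvHeapLoop (available_gpus.map (fun p => ((p.2.length : Int), p.1))) job_gpu_deficit []

-- ===== PORT B =====
-- single pass over the pre-sorted pair list
def pvAllocLoop : List (Int × String) → Int → List (String × Int) → List (String × Int)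
  | [], _, acc => acc
  | (c, node) :: t, remaining, acc =>
    if remaining ≤ 0 then acc
    else if remaining ≤ c then acc ++ [(node, remaining)]
    else pvAllocLoop t (remaining - c) (acc ++ [(node, c)])

def get_underutilized_servers_py_alt (job_gpu_deficit : Int) (available_gpus : List (String × List Int)) (consolidate : Bool) : List (String × Int) :=
  match (if 1 < job_gpu_deficit then available_gpus.find? (fun p => decide (job_gpu_deficit ≤ (p.2.length : Int))) else none) with
  | some p => [(p.1, job_gpu_deficit)]
  | none =>
    pvAllocLoop (PySem.List.sorted (available_gpus.map (fun p => ((p.2.length : Int), p.1))) pvKey false) job_gpu_deficit []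

-- ===== PRECONDITION & SPEC =====
-- Pre_ excludes association lists with duplicate node-id keys: those do not represent a
-- Python dict (dict construction collapses duplicates), so A's behaviour on them is undefined.
def Pre_get_underutilized_servers_py (job_gpu_deficit : Int) (available_gpus : List (String × List Int)) (consolidate : Bool) : Prop :=
  (available_gpus.map Prod.fst).Nodup
instance (job_gpu_deficit : Int) (available_gpus : List (String × List Int)) (consolidate : Bool) : Decidable (Pre_get_underutilized_servers_py job_gpu_deficit available_gpus consolidate) := by unfold Pre_get_underutilized_servers_py; infer_instance
def pvWitness_get_underutilized_servers_py : Int × (List (String × List Int)) × Bool :=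
  (3, [("node-a", [0, 1]), ("node-b", [2]), ("node-c", [3, 4, 5])], false)

def Spec_get_underutilized_servers_py (job_gpu_deficit : Int) (available_gpus : List (String × List Int)) (consolidate : Bool) (out : List (String × Int)) : Prop := out = get_underutilized_servers_py_alt job_gpu_deficit available_gpus consolidate
instance (job_gpu_deficit : Int) (available_gpus : List (String × List Int)) (consolidate : Bool) (out : List (String × Int)) : Decidable (Spec_get_underutilized_servers_py job_gpu_deficit available_gpus consolidate out) := by unfold Spec_get_underutilized_servers_py; infer_instance

-- ===== CLAIM (what is proved, stated in full; the proofs are below) =====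
def Claim_equal_get_underutilized_servers_py : Prop := ∀ (job_gpu_deficit : Int) (available_gpus : List (String × List Int)) (consolidate : Bool), Dom_get_underutilized_servers_py job_gpu_deficit available_gpus consolidate → Pre_get_underutilized_servers_py job_gpu_deficit available_gpus consolidate → Spec_get_underutilized_servers_py job_gpu_deficit available_gpus consolidate (get_underutilized_servers_py job_gpu_deficit available_gpus consolidate)

-- ===== LEMMAS AND PROOFS =====

theorem pvKey_injective : Function.Injective pvKey := by
  intro a b hk
  have h := toLex.injective hk
  have h1 : a.1 = b.1 := congrArg (fun p : Int × List Char => p.1) h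
  have h2 : a.2.toList = b.2.toList := congrArg (fun p : Int × List Char => p.2) h
  exact Prod.ext h1 (String.toList_injective h2)

theorem pvMinPair_le (x : Int × String) (xs : List (Int × String)) :
    ∀ y ∈ x :: xs, pvKey (pvMinPair x xs) ≤ pvKey y := by
  induction xs generalizing x with
  | nil => simp [pvMinPair]
  | cons z zs ih =>
    intro y hy
    have step : pvMinPair x (z :: zs) = pvMinPair (if pvKey z < pvKey x then z else x) zs := by
      simp [pvMinPair]
    rw [step]
    rw [List.mem_cons, List.mem_cons] at hy
    by_cases hc : pvKey z < pvKey x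
    · simp only [hc, if_pos]
      rcases hy with h | h | h
      · rw [h]; exact le_trans (ih z z List.mem_cons_self) (le_of_lt hc)
      · rw [h]; exact ih z z List.mem_cons_self
      · exact ih z y (List.mem_cons_of_mem _ h)
    · simp only [hc, if_neg, if_false]
      rcases hy with h | h | h
      · rw [h]; exact ih x x List.mem_cons_self
      · rw [h]; exact le_trans (ih x x List.mem_cons_self) (not_lt.mp hc)
      · exact ih x y (List.mem_cons_of_mem _ h)

theorem pvScanA_eq_find? (num : Int) (l : List (String × List Int)) :
    pvScanA num l = (l.find? (fun p => decide (num ≤ (p.2.length : Int)))).map (fun p => [(p.1, num)]) := by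
  induction l with
  | nil => simp [pvScanA]
  | cons p t ih =>
    obtain ⟨node, g⟩ := p
    by_cases h : num ≤ (g.length : Int)
    · simp [pvScanA, h, List.find?]
    · simp [pvScanA, h, List.find?, ih]

theorem pvAllocLoop_nonpos (ys : List (Int × String)) (r : Int) (acc : List (String × Int))
    (h : r ≤ 0) : pvAllocLoop ys r acc = acc := by
  cases ys with
  | nil => rfl
  | cons y t => obtain ⟨c, node⟩ := y; simp [pvAllocLoop, h]

-- the sorted order starts with the minimum: sorted(pq) = min :: sorted(pq with min removed)
theorem sorted_cons_min (x : Int × String) (xs : List (Int × String))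
    (hnd : (x :: xs).Nodup) :
    PySem.List.sorted (x :: xs) pvKey false
      = pvMinPair x xs :: PySem.List.sorted ((x :: xs).erase (pvMinPair x xs)) pvKey false := by
  set m := pvMinPair x xs with hm
  have hmem : m ∈ x :: xs := pvMinPair_mem x xs
  have herase_perm : (x :: xs).Perm (m :: (x :: xs).erase m) := List.perm_cons_erase hmem
  have hsp := PySem.List.sorted_perm ((x :: xs).erase m) pvKey false
  have hperm : (m :: PySem.List.sorted ((x :: xs).erase m) pvKey false).Perm (x :: xs) :=
    ((hsp.cons m).trans herase_perm.symm)
  have herasend : ((x :: xs).erase m).Nodup := List.Nodup.erase m hnd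
  have hsnd : (PySem.List.sorted ((x :: xs).erase m) pvKey false).Nodup :=
    hsp.nodup_iff.mpr herasend
  have hple : List.Pairwise (fun a b => pvKey a ≤ pvKey b) (PySem.List.sorted ((x :: xs).erase m) pvKey false) :=
    PySem.List.sorted_pairwise _ pvKey
  have hplt : List.Pairwise (fun a b => pvKey a < pvKey b) (PySem.List.sorted ((x :: xs).erase m) pvKey false) := by
    refine (hple.and hsnd).imp ?_
    rintro a b ⟨hle, hne⟩
    exact lt_of_le_of_ne hle (fun h => hne (pvKey_injective h))
  have hhead : ∀ b ∈ PySem.List.sorted ((x :: xs).erase m) pvKey false, pvKey m < pvKey b := by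
    intro b hb
    rw [PySem.List.mem_sorted] at hb
    have hble : pvKey m ≤ pvKey b := pvMinPair_le x xs b (List.mem_of_mem_erase hb)
    have hne : m ≠ b := by
      intro h
      rw [← h] at hb
      exact (List.Nodup.not_mem_erase hnd) hb
    exact lt_of_le_of_ne hble (fun h => hne (pvKey_injective h))
  exact PySem.List.sorted_eq_of_perm_of_pairwise_lt _ _ pvKey hperm
    (List.pairwise_cons.mpr ⟨hhead, hplt⟩)

theorem heapLoop_eq_allocLoop (n : Nat) : ∀ pq : List (Int × String), pq.length = n → pq.Nodup →
    ∀ (r : Int) (acc : List (String × Int)),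
      pvHeapLoop pq r acc = pvAllocLoop (PySem.List.sorted pq pvKey false) r acc := by
  induction n using Nat.strong_induction_on with
  | _ n ih =>
    intro pq hlen hnd r acc
    by_cases hr : 0 < r
    · cases pq with
      | nil =>
        rw [pvHeapLoop.eq_def]
        simp only [hr, if_pos]
        have hs : PySem.List.sorted ([] : List (Int × String)) pvKey false = [] := rfl
        rw [hs]; rfl
      | cons x xs =>
        rw [pvHeapLoop.eq_def, sorted_cons_min x xs hnd]
        simp only [hr, if_pos]
        have hr' : ¬ r ≤ 0 := by omega
        by_cases hge : r ≤ (pvMinPair x xs).1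
        · simp [pvAllocLoop, hr', hge]
        · simp only [pvAllocLoop, hr', hge, if_false]
          have hmem : pvMinPair x xs ∈ x :: xs := pvMinPair_mem x xs
          have hlt : ((x :: xs).erase (pvMinPair x xs)).length < n := by
            rw [List.length_erase_of_mem hmem, ← hlen]
            simp
          exact ih _ hlt _ rfl (List.Nodup.erase _ hnd) (r - (pvMinPair x xs).1)
            (acc ++ [((pvMinPair x xs).2, (pvMinPair x xs).1)])
    · rw [pvHeapLoop.eq_def]
      simp only [hr, if_neg, if_false]
      exact (pvAllocLoop_nonpos _ r acc (by omega)).symm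

theorem pq_nodup_of_pre (ag : List (String × List Int))
    (hpre : (ag.map Prod.fst).Nodup) : (ag.map (fun p => ((p.2.length : Int), p.1))).Nodup := by
  have h : (ag.map (fun p => ((p.2.length : Int), p.1))).map Prod.snd = ag.map Prod.fst := by
    simp [List.map_map, Function.comp]
  exact List.Nodup.of_map Prod.snd (by rw [h]; exact hpre)

-- ===== VERDICT (by name: the statement is the Claim_ definition above) =====
theorem get_underutilized_servers_py_spec : Claim_equal_get_underutilized_servers_py := by
  intro n ag c _hdom hpre
  unfold Spec_get_underutilized_servers_py
  unfold get_underutilized_servers_py get_underutilized_servers_py_alt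
  rw [pvScanA_eq_find?]
  cases hf : ag.find? (fun p => decide (n ≤ (p.2.length : Int))) with
  | some p =>
    by_cases h1 : 1 < n
    · simp [h1]
    · simp only [h1, if_false]
      exact heapLoop_eq_allocLoop _ _ rfl (pq_nodup_of_pre ag hpre) n []
  | none =>
    by_cases h1 : 1 < n
    · simp only [h1, if_true, Option.map_none]
      exact heapLoop_eq_allocLoop _ _ rfl (pq_nodup_of_pre ag hpre) n []
    · simp only [h1, if_false]
      exact heapLoop_eq_allocLoop _ _ rfl (pq_nodup_of_pre ag hpre) n []
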